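-- pv_equiv track=rewrite | github.com/adriz-nf/adventofcode | 2022/day1.py | tday1
-- ===== SOURCE A (Python) =====
-- def tday1(input_file):
--     data = input_file
--
--     max_value = 0
--     running_total = 0
--     for line in data:
--         if line == "":
--             max_value = max(max_value,running_total)
--             running_total = 0
--         else:
--             running_total += int(line)
--     return max_value
-- ===== SOURCE B (Python) =====
-- def tday1(input_file):
--     groups = []
--     current = []
--     for line in input_file:
--         if line == "":
--             groups.append(current)
--             current = []
--         else:
--             current.append(int(line))
--     # the unterminated trailing group is intentionally not appended, matching A
--     return max([0] + [sum(g) for g in groups])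
-- ===== Notes on version B (the rewrite author's own statement) =====
-- stated objective: idiomatic
-- what changed: B first materialises the blank-line-separated groups as lists of parsed ints, then computes the answer in a second pass as max([0] + [sum(g) for g in groups]), instead of A's single streaming running-total/running-max fold.
import Mathlib
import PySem

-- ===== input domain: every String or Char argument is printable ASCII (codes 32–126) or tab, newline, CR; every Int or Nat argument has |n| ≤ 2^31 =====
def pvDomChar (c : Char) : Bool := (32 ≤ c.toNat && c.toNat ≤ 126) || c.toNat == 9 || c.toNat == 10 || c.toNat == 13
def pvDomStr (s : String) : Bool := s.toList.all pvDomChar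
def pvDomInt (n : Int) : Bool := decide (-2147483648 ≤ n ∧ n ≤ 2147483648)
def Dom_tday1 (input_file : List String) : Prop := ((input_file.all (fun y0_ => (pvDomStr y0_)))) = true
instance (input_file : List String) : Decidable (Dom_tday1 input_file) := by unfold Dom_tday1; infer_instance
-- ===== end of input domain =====

-- B materialises the blank-line-separated groups as lists of ints, then takes max of 0 and the group sums in a second pass (idiomatic re-decomposition; same cost).

-- ===== PORT A =====
-- single pass, state (max_value, running_total); int(line) via PySem.Int.ofStr? (Pre_ guarantees some)
def tday1 (input_file : List String) : Int :=
  (input_file.foldl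
    (fun (st : Int × Int) line =>
      if line == "" then (max st.1 st.2, 0)
      else (st.1, st.2 + (PySem.Int.ofStr? line).getD 0))
    (0, 0)).1

-- ===== PORT B =====
-- pass 1: build the groups of parsed ints (trailing unterminated group not appended)
def tday1Groups (input_file : List String) : List (List Int) :=
  (input_file.foldl
    (fun (st : List (List Int) × List Int) line =>
      if line == "" then (st.1 ++ [st.2], [])
      else (st.1, st.2 ++ [(PySem.Int.ofStr? line).getD 0]))
    ([], [])).1

-- pass 2: max([0] + [sum(g) for g in groups])
def tday1_alt (input_file : List String) : Int :=
  ((tday1Groups input_file).map (fun g => g.foldl (· + ·) 0)).foldl max 0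

-- ===== PRECONDITION & SPEC =====
-- Pre_ excludes exactly the inputs where int(line) raises ValueError in both programs
def Pre_tday1 (input_file : List String) : Prop :=
  (input_file.all (fun line => line.isEmpty || (PySem.Int.ofStr? line).isSome)) = true
instance (input_file : List String) : Decidable (Pre_tday1 input_file) := by
  unfold Pre_tday1; infer_instance
def pvWitness_tday1 : List String := ["1", "2", "", "3", "-4", "", "5"]

def Spec_tday1 (input_file : List String) (out : Int) : Prop := out = tday1_alt input_file
instance (input_file : List String) (out : Int) : Decidable (Spec_tday1 input_file out) := by unfold Spec_tday1; infer_instance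

-- ===== CLAIM (what is proved, stated in full; the proofs are below) =====
def Claim_equal_tday1 : Prop := ∀ (input_file : List String), Dom_tday1 input_file → Pre_tday1 input_file → Spec_tday1 input_file (tday1 input_file)

-- ===== LEMMAS AND PROOFS =====

-- invariant relating A's streaming state to B's group accumulator
theorem tday1_core (l : List String) (gs : List (List Int)) (cur : List Int) :
    (l.foldl
      (fun (st : Int × Int) line =>
        if line == "" then (max st.1 st.2, 0)
        else (st.1, st.2 + (PySem.Int.ofStr? line).getD 0))
      ((gs.map (fun g => g.foldl (· + ·) 0)).foldl max 0, cur.foldl (· + ·) 0)).1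
    =
    (((l.foldl
      (fun (st : List (List Int) × List Int) line =>
        if line == "" then (st.1 ++ [st.2], [])
        else (st.1, st.2 ++ [(PySem.Int.ofStr? line).getD 0]))
      (gs, cur)).1).map (fun g => g.foldl (· + ·) 0)).foldl max 0 := by
  induction l generalizing gs cur with
  | nil => simp
  | cons line rest ih =>
    by_cases h : line = ""
    · subst h
      simpa using ih (gs ++ [cur]) []
    · have := ih gs (cur ++ [(PySem.Int.ofStr? line).getD 0])
      simp [h] at this ⊢
      simpa using this

-- ===== VERDICT (by name: the statement is the Claim_ definition above) =====
theorem tday1_spec : Claim_equal_tday1 := by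
  intro input_file _ _
  unfold Spec_tday1 tday1 tday1_alt tday1Groups
  simpa using (tday1_core input_file [] [])
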